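-- pv_equiv track=rewrite | github.com/pradeepchitturi/cricinfoscraperToADLS | core/commentary_parser.py | _clean_photo_markers
-- ===== SOURCE A (Python) =====
-- def _clean_photo_markers(all_text):
--     """
--     Clean up "See all photos" markers and empty elements
--
--     Strategy:
--     1. Find "See all photos" element
--     2. If next element is empty, remove both
--     3. If next element has content, just remove "See all photos"
--
--     Args:
--         all_text: List of text elements
--
--     Returns:
--         Cleaned list with photo markers removed
--     """
--     if not all_text:
--         return all_text
--
--     cleaned = []
--     i = 0
--
--     while i < len(all_text):
--         current = all_text[i]
--
--         # Check if current element is "See all photos" (case insensitive)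
--         if current and 'see all photo' in current.lower():
--             # Check if there's a next element
--             if i + 1 < len(all_text):
--                 next_element = all_text[i + 1]
--
--                 # If next element is empty or whitespace
--                 if not next_element or not next_element.strip():
--                     # Skip both current ("See all photos") and next (empty)
--                     i += 2
--                     continue
--                 else:
--                     # Next element has content, just skip "See all photos"
--                     i += 1
--                     continue
--             else:
--                 # "See all photos" is last element, skip it
--                 i += 1
--                 continue
--         else:
--             # Keep this element
--             cleaned.append(current)
--             i += 1
--
--     return cleaned
-- ===== SOURCE B (Python) =====
-- def _clean_photo_markers(all_text):
--     """Zip-with-previous filter: keep an element unless it is a photo marker or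
--     an empty element immediately following a marker."""
--     if not all_text:
--         return all_text
--
--     def is_marker(s):
--         return bool(s) and 'see all photo' in s.lower()
--
--     def is_blank(s):
--         return not s or not s.strip()
--
--     prevs = [None] + all_text[:-1]
--     return [x for p, x in zip(prevs, all_text)
--             if not is_marker(x) and not (p is not None and is_marker(p) and is_blank(x))]
-- ===== Notes on version B (the rewrite author's own statement) =====
-- stated objective: simpler
-- what changed: Replaced the stateful while-loop cursor with skip-1/skip-2 index arithmetic by a stateless one-pass zip-with-previous filter: each element is kept iff it is not a marker and not a blank immediately preceded by a marker.
import Mathlib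
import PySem

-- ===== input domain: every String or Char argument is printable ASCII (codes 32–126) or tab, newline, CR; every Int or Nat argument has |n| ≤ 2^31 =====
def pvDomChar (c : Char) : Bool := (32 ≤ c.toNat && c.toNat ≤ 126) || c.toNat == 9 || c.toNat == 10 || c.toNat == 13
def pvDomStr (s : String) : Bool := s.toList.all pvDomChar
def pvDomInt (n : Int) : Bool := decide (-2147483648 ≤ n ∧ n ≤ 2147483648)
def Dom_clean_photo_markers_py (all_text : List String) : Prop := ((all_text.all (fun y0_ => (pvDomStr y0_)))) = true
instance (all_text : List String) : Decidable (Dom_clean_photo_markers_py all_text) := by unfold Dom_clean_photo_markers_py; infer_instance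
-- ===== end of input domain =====

-- B replaces A's stateful while-loop cursor (skip-1 / skip-2 index arithmetic) by a stateless
-- zip-with-previous filter; objective: simpler.

-- shared predicates (both Pythons test exactly these conditions)
-- "current and 'see all photo' in current.lower()"
def pvIsMarker (s : String) : Bool := !(s == "") && PySem.Str.isIn "see all photo" (PySem.Str.lower s)
-- "not s or not s.strip()"
def pvIsBlank (s : String) : Bool := (s == "") || (PySem.Str.strip s == "")

-- ===== PORT A =====
-- the while loop over index i, as recursion on the suffix all_text[i:]
def pvCleanGo : List String → List String
  | [] => []
  | x :: xs =>
    if pvIsMarker x then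
      match xs with
      | [] => []                                   -- marker is last: skip it, loop ends
      | y :: ys => if pvIsBlank y then pvCleanGo ys  -- i += 2
                   else pvCleanGo (y :: ys)          -- i += 1
    else x :: pvCleanGo xs                           -- keep, i += 1
termination_by l => l.length

def clean_photo_markers_py (all_text : List String) : List String :=
  if all_text = [] then all_text else pvCleanGo all_text

-- ===== PORT B =====
-- "not is_marker(x) and not (p is not None and is_marker(p) and is_blank(x))"
def pvKeep (p : Option String) (x : String) : Bool :=
  !pvIsMarker x && !(match p with
                     | some q => pvIsMarker q && pvIsBlank x
                     | none => false)

def clean_photo_markers_py_alt (all_text : List String) : List String :=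
  if all_text = [] then all_text else
    let prevs : List (Option String) := none :: all_text.dropLast.map some
    ((prevs.zip all_text).filter (fun px => pvKeep px.1 px.2)).map Prod.snd

-- ===== PRECONDITION & SPEC =====
def Spec_clean_photo_markers_py (all_text : List String) (out : List String) : Prop := out = clean_photo_markers_py_alt all_text
instance (all_text : List String) (out : List String) : Decidable (Spec_clean_photo_markers_py all_text out) := by unfold Spec_clean_photo_markers_py; infer_instance

-- ===== CLAIM (what is proved, stated in full; the proofs are below) =====
def Claim_equal_clean_photo_markers_py : Prop := ∀ (all_text : List String), Dom_clean_photo_markers_py all_text → Spec_clean_photo_markers_py all_text (clean_photo_markers_py all_text)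

-- ===== LEMMAS AND PROOFS =====

-- a marker string is never blank: it contains a non-whitespace character ('s')
lemma pv_marker_not_blank (s : String) (h : pvIsMarker s = true) : pvIsBlank s = false := by
  unfold pvIsMarker at h
  simp only [Bool.and_eq_true, Bool.not_eq_true', beq_eq_false_iff_ne, ne_eq] at h
  obtain ⟨hne, hin⟩ := h
  unfold pvIsBlank
  simp only [Bool.or_eq_false_iff, beq_eq_false_iff_ne, ne_eq]
  refine ⟨hne, fun hstrip => ?_⟩
  -- 's' occurs in lower s, so some c ∈ s.toList has lowerChar c = 's'
  have hinf := (PySem.Str.isIn_iff_infix _ _).mp hin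
  have hmem : ('s' : Char) ∈ (PySem.Str.lower s).toList := hinf.subset (by decide)
  rw [PySem.Str.toList_lower] at hmem
  obtain ⟨c, hc, hlc⟩ : ∃ c ∈ s.toList, PySem.Chars.lowerChar c = 's' := by
    simpa [PySem.Chars.lower] using hmem
  -- strip s = "" forces every character of s to be whitespace
  have htl : PySem.Chars.strip s.toList = [] := by
    have := congrArg String.toList hstrip
    rwa [PySem.Str.toList_strip] at this
  have hsp : ∀ d ∈ s.toList, PySem.Chars.isspace d = true := by
    unfold PySem.Chars.strip PySem.Chars.rstrip PySem.Chars.lstrip at htl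
    rw [List.reverse_eq_nil_iff, List.dropWhile_eq_nil_iff] at htl
    intro d hd
    rcases (List.mem_append.mp (by
      rw [List.takeWhile_append_dropWhile]; exact hd :
        d ∈ s.toList.takeWhile PySem.Chars.isspace ++ s.toList.dropWhile PySem.Chars.isspace)) with hdt | hdd
    · exact List.mem_takeWhile_imp hdt
    · exact htl d (List.mem_reverse.mpr hdd)
  -- but a whitespace character never lowercases to 's'
  have hspc := hsp c hc
  simp only [PySem.Chars.isspace, Bool.or_eq_true, Bool.and_eq_true, decide_eq_true_eq] at hspc
  by_cases hup : PySem.Chars.isupper c = true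
  · simp only [PySem.Chars.isupper, Bool.and_eq_true, decide_eq_true_eq] at hup
    have h1 : 65 ≤ c.toNat := Char.le_def.mp hup.1
    have h2 : c.toNat ≤ 90 := Char.le_def.mp hup.2
    omega
  · simp only [PySem.Chars.lowerChar, hup] at hlc
    subst hlc
    simp at hspc

-- proof-side normal form: keep-or-drop driven by "was the previous element a marker" (m)
def pvH (m : Bool) : List String → List String
  | [] => []
  | x :: xs =>
    if pvIsMarker x || (m && pvIsBlank x) then pvH (pvIsMarker x) xs
    else x :: pvH (pvIsMarker x) xs

def pvMarkerOf : Option String → Bool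
  | none => false
  | some q => pvIsMarker q

-- B's zip-with-previous computation, with the previous element generalized
def pvG (p : Option String) (l : List String) : List String :=
  (((p :: l.map some).zip l).filter (fun px => pvKeep px.1 px.2)).map Prod.snd

-- Python's [None] + all_text[:-1] zipped with all_text equals the map-some form (zip truncates)
lemma pv_zip_prevs : ∀ (l : List String) (p : Option String),
    ((p :: l.dropLast.map some).zip l) = ((p :: l.map some).zip l) := by
  intro l
  induction l with
  | nil => intro p; rfl
  | cons x xs ih =>
    intro p
    cases xs with
    | nil => rfl
    | cons y ys =>
      simp only [List.dropLast_cons₂, List.map_cons, List.zip_cons_cons]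
      have h := ih (some x)
      simp only [List.map_cons, List.zip_cons_cons, List.cons.injEq, true_and] at h
      rw [h]

lemma pvG_eq_pvH : ∀ (l : List String) (p : Option String), pvG p l = pvH (pvMarkerOf p) l := by
  intro l
  induction l with
  | nil => intro p; rfl
  | cons x xs ih =>
    intro p
    have hkeep : pvKeep p x = !(pvIsMarker x || (pvMarkerOf p && pvIsBlank x)) := by
      cases p <;> simp [pvKeep, pvMarkerOf, Bool.and_comm]
    have hx := ih (some x)
    simp only [pvG, pvMarkerOf] at hx
    simp only [pvG, List.map_cons, List.zip_cons_cons, List.filter_cons, pvH]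
    rw [hkeep]
    cases hcond : (pvIsMarker x || (pvMarkerOf p && pvIsBlank x)) <;> simp [hx]

-- A's cursor loop equals pvH: part 1 for a fresh position, part 2 for "just after a marker"
lemma pv_cleanGo_eq_pvH : ∀ (n : Nat) (l : List String), l.length ≤ n →
    pvCleanGo l = pvH false l ∧
    (match l with
     | [] => ([] : List String)
     | y :: ys => if pvIsBlank y then pvCleanGo ys else pvCleanGo (y :: ys)) = pvH true l := by
  intro n
  induction n with
  | zero =>
    intro l hl
    have : l = [] := List.eq_nil_of_length_eq_zero (Nat.le_zero.mp hl)
    subst this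
    exact ⟨by simp [pvCleanGo, pvH], rfl⟩
  | succ n ih =>
    intro l hl
    cases l with
    | nil => exact ⟨by simp [pvCleanGo, pvH], rfl⟩
    | cons x xs =>
      have hxs : xs.length ≤ n := by simpa using Nat.le_of_succ_le_succ hl
      have part1 : pvCleanGo (x :: xs) = pvH false (x :: xs) := by
        by_cases hm : pvIsMarker x = true
        · cases xs with
          | nil => simp [pvCleanGo, pvH, hm]
          | cons y ys =>
            have h2 := (ih (y :: ys) hxs).2
            simp only at h2
            have hstep : pvCleanGo (x :: y :: ys) =
                if pvIsBlank y then pvCleanGo ys else pvCleanGo (y :: ys) := by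
              rw [pvCleanGo.eq_def]; simp [hm]
            rw [hstep, h2]
            conv_rhs => rw [pvH]
            simp [hm]
        · have h1 := (ih xs hxs).1
          rw [pvCleanGo.eq_def]
          simp only [hm]
          rw [pvH]
          simp [hm, h1]
      refine ⟨part1, ?_⟩
      show (if pvIsBlank x then pvCleanGo xs else pvCleanGo (x :: xs)) = pvH true (x :: xs)
      by_cases hb : pvIsBlank x = true
      · have hm : pvIsMarker x = false := by
          by_contra hmm
          rw [pv_marker_not_blank x (by simpa using hmm)] at hb
          exact Bool.false_ne_true hb
        have h1 := (ih xs hxs).1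
        rw [pvH]
        simp [hm, hb, h1]
      · have hbf : pvIsBlank x = false := by simpa using hb
        rw [if_neg (by simp [hbf]), part1]
        conv_rhs => rw [pvH]
        conv_lhs => rw [pvH]
        simp [hbf]

-- ===== VERDICT (by name: the statement is the Claim_ definition above) =====
theorem clean_photo_markers_py_spec : Claim_equal_clean_photo_markers_py := by
  intro all_text _
  unfold Spec_clean_photo_markers_py clean_photo_markers_py clean_photo_markers_py_alt
  by_cases hnil : all_text = []
  · simp [hnil]
  · simp only [hnil, if_false]
    rw [pv_zip_prevs all_text none]
    have hG : pvG none all_text = pvH false all_text := by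
      rw [pvG_eq_pvH]; rfl
    have hA := (pv_cleanGo_eq_pvH all_text.length all_text (le_refl _)).1
    rw [hA, ← hG]
    rfl
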